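-- pv_equiv track=rewrite | github.com/ZigaStrgar/programiranje1 | Izpit/testni-primeri-1430.py | stevilo_sosedov
-- ===== SOURCE A (Python) =====
-- def stevilo_sosedov(s):
--     sums = []
--     for i, e in enumerate(s):
--         i1 = i + 1
--         if i1 >= len(s):
--             i1 = 0
--         sums.append(s[i1] + s[i - 1])
--     return sums
-- ===== SOURCE B (Python) =====
-- def stevilo_sosedov(s):
--     nxt = s[1:] + s[:1]
--     prv = s[-1:] + s[:-1]
--     return [a + b for a, b in zip(nxt, prv)]
-- ===== Notes on version B (the rewrite author's own statement) =====
-- stated objective: idiomatic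
-- what changed: Replaced the index-maintaining loop with modular neighbor indexing by two whole-list rotations (next and previous) combined in one flat zip pass.
import Mathlib
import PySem

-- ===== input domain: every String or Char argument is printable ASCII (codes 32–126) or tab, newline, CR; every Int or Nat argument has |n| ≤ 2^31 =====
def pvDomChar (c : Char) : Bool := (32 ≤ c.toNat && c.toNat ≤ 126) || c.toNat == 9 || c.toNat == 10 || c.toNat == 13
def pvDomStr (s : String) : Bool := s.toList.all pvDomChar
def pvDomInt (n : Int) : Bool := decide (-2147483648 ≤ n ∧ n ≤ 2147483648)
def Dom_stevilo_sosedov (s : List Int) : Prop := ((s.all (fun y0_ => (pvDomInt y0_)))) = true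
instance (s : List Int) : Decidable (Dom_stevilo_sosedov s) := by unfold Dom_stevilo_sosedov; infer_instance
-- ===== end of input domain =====

-- B replaces A's index-maintaining loop by two whole-list rotations combined in one zip pass (idiomatic).

-- ===== PORT A =====
def stevilo_sosedov (s : List Int) : List Int :=
  (PySem.List.enumerate s).foldl (fun sums ie =>
    let i := ie.1
    let i1 := i + 1
    let i1 := if i1 ≥ (s.length : Int) then 0 else i1
    sums ++ [PySem.List.pyGetD s i1 0 + PySem.List.pyGetD s (i - 1) 0]) []

-- ===== PORT B =====
def stevilo_sosedov_alt (s : List Int) : List Int :=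
  let nxt := PySem.List.slice s (some 1) none ++ PySem.List.slice s none (some 1)
  let prv := PySem.List.slice s (some (-1)) none ++ PySem.List.slice s none (some (-1))
  (nxt.zip prv).map (fun p => p.1 + p.2)

-- ===== PRECONDITION & SPEC =====
def Spec_stevilo_sosedov (s : List Int) (out : List Int) : Prop := out = stevilo_sosedov_alt s
instance (s : List Int) (out : List Int) : Decidable (Spec_stevilo_sosedov s out) := by unfold Spec_stevilo_sosedov; infer_instance

-- ===== CLAIM (what is proved, stated in full; the proofs are below) =====
def Claim_equal_stevilo_sosedov : Prop := ∀ (s : List Int), Dom_stevilo_sosedov s → Spec_stevilo_sosedov s (stevilo_sosedov s)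

-- ===== LEMMAS AND PROOFS =====

theorem stevilo_sosedov_eq_map (s : List Int) :
    stevilo_sosedov s = (PySem.List.enumerate s).map (fun ie =>
      PySem.List.pyGetD s (if ie.1 + 1 ≥ (s.length : Int) then 0 else ie.1 + 1) 0 +
      PySem.List.pyGetD s (ie.1 - 1) 0) := by
  unfold stevilo_sosedov
  exact PySem.List.foldl_append_singleton_eq_map _ _ _

-- ===== VERDICT (by name: the statement is the Claim_ definition above) =====
theorem stevilo_sosedov_spec : Claim_equal_stevilo_sosedov := by
  intro s _
  unfold Spec_stevilo_sosedov stevilo_sosedov_alt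
  rw [stevilo_sosedov_eq_map]
  apply List.ext_getElem
  · simp [PySem.List.length_enumerate, PySem.List.slice_from_one, PySem.List.slice_from_neg_one,
      PySem.List.slice_to_neg_one, PySem.List.slice_to (b := 1) (by omega)]
    omega
  · intro k h1 h2
    simp only [List.getElem_map, List.getElem_zip, PySem.List.getElem_enumerate,
      PySem.List.slice_from_one, PySem.List.slice_from_neg_one, PySem.List.slice_to_neg_one]
    have hk : k < s.length := by simpa [PySem.List.length_enumerate] using h1
    have hne : s ≠ [] := by intro h; subst h; simp at hk
    congr 1
    · by_cases hlast : k + 1 = s.length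
      · rw [if_pos (by omega)]
        rw [List.getElem_append_right (by simp; omega)]
        simp [PySem.List.pyGetD_zero, List.getD_eq_getElem?_getD, List.getElem?_eq_getElem (by omega : 0 < s.length)]
        have hz : k - (s.length - 1) = 0 := by omega
        simp [hz, PySem.List.slice_to]
      · rw [if_neg (by omega)]
        rw [List.getElem_append_left (by simp; omega)]
        have hc : (0 : Int) + ↑k + 1 = ((k + 1 : Nat) : Int) := by push_cast; ring
        rw [hc, PySem.List.pyGetD_natCast]
        simp [List.getElem_tail, List.getD_eq_getElem?_getD, List.getElem?_eq_getElem (by omega : k + 1 < s.length)]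
    · by_cases h0 : k = 0
      · subst h0
        have hc : (0 : Int) + (0 : Nat) - 1 = (-1 : Int) := by norm_num
        rw [hc, PySem.List.pyGetD_neg_one _ _ hne]
        rw [List.getElem_append_left (by simp; omega)]
        simp [List.getLast_eq_getElem, List.getElem_drop]
      · have hc : (0 : Int) + ↑k - 1 = ((k - 1 : Nat) : Int) := by omega
        rw [hc, PySem.List.pyGetD_natCast]
        rw [List.getElem_append_right (by simp; omega)]
        have hd : s.length - (s.length - 1) = 1 := by omega
        simp [hd, List.getElem_dropLast, List.getD_eq_getElem?_getD, List.getElem?_eq_getElem (by omega : k - 1 < s.length)]
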